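-- pv_equiv track=rewrite | github.com/EthanWTL/explore_diffusion_spatial | scripts/maze_gen_2path.py | would_make_2x2_room
-- ===== SOURCE A (Python) =====
-- DIRS = {'N': (-1, 0), 'S': (1, 0), 'E': (0, 1), 'W': (0, -1)}
--
-- OPP  = {'N':'S', 'S':'N', 'E':'W', 'W':'E'}
--
-- def in_bounds(r: int, c: int, rows: int, cols: int) -> bool:
--     return 0 <= r < rows and 0 <= c < cols
--
-- def would_make_2x2_room(grid, r, c, d) -> bool:
--     """Lightweight guard: opening (r,c,d) would complete a fully open 2×2 block?"""
--     rows, cols = len(grid), len(grid[0])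
--     dr, dc = DIRS[d]
--     r2, c2 = r + dr, c + dc
--     if not in_bounds(r2, c2, rows, cols):
--         return False
--
--     def is_open(a, b):
--         (ra,ca),(rb,cb) = a,b
--         if ra == rb and cb == ca+1:
--             return (not grid[ra][ca]['E']) and (not grid[rb][cb]['W'])
--         if ra == rb and cb == ca-1:
--             return (not grid[ra][ca]['W']) and (not grid[rb][cb]['E'])
--         if ca == cb and rb == ra+1:
--             return (not grid[ra][ca]['S']) and (not grid[rb][cb]['N'])
--         if ca == cb and rb == ra-1:
--             return (not grid[ra][ca]['N']) and (not grid[rb][cb]['S'])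
--         return False
--
--     # Treat (r,c,d) as opened for the check
--     def open_or(a, b):
--         (ra,ca),(rb,cb) = a,b
--         if ra == rb and cb == ca+1:
--             return is_open(a,b) or ((ra,ca)==(r,c) and d=='E') or ((rb,cb)==(r2,c2) and OPP[d]=='W')
--         if ra == rb and cb == ca-1:
--             return is_open(a,b) or ((ra,ca)==(r,c) and d=='W') or ((rb,cb)==(r2,c2) and OPP[d]=='E')
--         if ca == cb and rb == ra+1:
--             return is_open(a,b) or ((ra,ca)==(r,c) and d=='S') or ((rb,cb)==(r2,c2) and OPP[d]=='N')
--         if ca == cb and rb == ra-1: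
--             return is_open(a,b) or ((ra,ca)==(r,c) and d=='N') or ((rb,cb)==(r2,c2) and OPP[d]=='S')
--         return False
--
--     quads = []
--     if d in ('E','W'):
--         rr = r-1
--         if in_bounds(rr, c, rows, cols) and in_bounds(rr, c2, rows, cols):
--             quads.append([(r,c),(r,c2),(rr,c),(rr,c2)])
--         rr = r
--         if in_bounds(rr+1, c, rows, cols) and in_bounds(rr+1, c2, rows, cols):
--             quads.append([(r,c),(r,c2),(r+1,c),(r+1,c2)])
--     else:
--         cc = c-1
--         if in_bounds(r, cc, rows, cols) and in_bounds(r2, cc, rows, cols):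
--             quads.append([(r,c),(r2,c),(r,cc),(r2,cc)])
--         cc = c
--         if in_bounds(r, cc+1, rows, cols) and in_bounds(r2, cc+1, rows, cols):
--             quads.append([(r,c),(r2,c),(r,cc+1),(r2,cc+1)])
--
--     for quad in quads:
--         a,b,c3,d3 = quad
--         edges = [(a,b),(a,c3),(d3,b),(d3,c3)]
--         if all(open_or(u,v) for (u,v) in edges):
--             return True
--     return False
-- ===== SOURCE B (Python) =====
-- DIRS = {'N': (-1, 0), 'S': (1, 0), 'E': (0, 1), 'W': (0, -1)}
-- OPP  = {'N': 'S', 'S': 'N', 'E': 'W', 'W': 'E'}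
--
-- def _block_open(g, tr, tc):
--     # all four interior walls of the 2x2 block with top-left (tr,tc) are open in g
--     return (not g[tr][tc]['E'] and not g[tr][tc + 1]['W']
--             and not g[tr + 1][tc]['E'] and not g[tr + 1][tc + 1]['W']
--             and not g[tr][tc]['S'] and not g[tr + 1][tc]['N']
--             and not g[tr][tc + 1]['S'] and not g[tr + 1][tc + 1]['N'])
--
-- def would_make_2x2_room(grid, r, c, d) -> bool:
--     # Simulate the opening on a copy of the grid, then scan the whole grid for a
--     # fully open 2x2 block that contains the opened edge's two cells.
--     rows, cols = len(grid), len(grid[0])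
--     dr, dc = DIRS[d]
--     r2, c2 = r + dr, c + dc
--     if not (0 <= r < rows and 0 <= c < cols and 0 <= r2 < rows and 0 <= c2 < cols):
--         return False
--     g = [[dict(cell) for cell in row] for row in grid]
--     g[r][c][d] = False
--     g[r2][c2][OPP[d]] = False
--     ends = {(r, c), (r2, c2)}
--     for tr in range(rows - 1):
--         for tc in range(cols - 1):
--             block = {(tr, tc), (tr, tc + 1), (tr + 1, tc), (tr + 1, tc + 1)}
--             if ends <= block and _block_open(g, tr, tc):
--                 return True
--     return False
-- ===== Notes on version B (the rewrite author's own statement) =====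
-- stated objective: alternative
-- what changed: B simulates the opening on a copy of the grid (clearing both flags of the opened wall) and then brute-force scans every 2x2 top-left corner of the whole grid for a fully open block that contains the opened edge's two cells, replacing A's hand-enumerated candidate quads and the is_open/open_or closure pair with a plain open-block test on the mutated copy.
import Mathlib
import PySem

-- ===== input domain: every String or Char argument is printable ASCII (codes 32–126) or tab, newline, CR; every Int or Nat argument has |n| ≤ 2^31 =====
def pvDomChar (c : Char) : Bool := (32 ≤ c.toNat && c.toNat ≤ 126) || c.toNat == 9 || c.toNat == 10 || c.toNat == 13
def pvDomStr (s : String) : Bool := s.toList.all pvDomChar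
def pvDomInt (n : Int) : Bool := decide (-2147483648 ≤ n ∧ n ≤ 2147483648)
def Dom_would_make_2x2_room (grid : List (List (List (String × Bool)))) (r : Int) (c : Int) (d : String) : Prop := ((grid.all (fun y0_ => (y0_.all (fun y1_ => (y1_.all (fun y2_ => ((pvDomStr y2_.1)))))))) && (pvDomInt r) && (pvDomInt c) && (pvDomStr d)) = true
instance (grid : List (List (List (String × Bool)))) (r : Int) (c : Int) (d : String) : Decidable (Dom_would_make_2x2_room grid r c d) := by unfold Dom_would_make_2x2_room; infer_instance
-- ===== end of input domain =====

-- B replaces A's open_or closure over hand-enumerated candidate quads by a different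
-- algorithm: simulate the opening on a functional copy of the grid (clear both flags of
-- the opened wall) and brute-force scan every 2x2 top-left corner of the whole grid for
-- a fully open block containing the opened edge's two cells.

-- shared module-level constants of the Python file (DIRS / OPP) and the raw
-- grid[x][y][k] read (Python indexing + dict lookup; total via defaults — Pre_
-- guarantees every read A or B performs actually succeeds in Python)
def pvDirs (d : String) : Int × Int :=
  if d = "N" then (-1, 0) else if d = "S" then (1, 0)
  else if d = "E" then (0, 1) else if d = "W" then (0, -1) else (0, 0)

def pvOpp (d : String) : String :=
  if d = "N" then "S" else if d = "S" then "N"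
  else if d = "E" then "W" else if d = "W" then "E" else ""

def pvRead (grid : List (List (List (String × Bool)))) (x y : Int) (k : String) : Bool :=
  match PySem.List.pyGet? grid x with
  | none => false
  | some row =>
    match PySem.List.pyGet? row y with
    | none => false
    | some cell => ((PySem.Dict.mk cell).get? k).getD false

-- ===== PORT A =====
def pvInB (r c rows cols : Int) : Bool := decide (0 ≤ r ∧ r < rows ∧ 0 ≤ c ∧ c < cols)

def aIsOpen (grid : List (List (List (String × Bool)))) (a b : Int × Int) : Bool :=
  let (ra, ca) := a; let (rb, cb) := b
  if ra = rb ∧ cb = ca + 1 then !pvRead grid ra ca "E" && !pvRead grid rb cb "W"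
  else if ra = rb ∧ cb = ca - 1 then !pvRead grid ra ca "W" && !pvRead grid rb cb "E"
  else if ca = cb ∧ rb = ra + 1 then !pvRead grid ra ca "S" && !pvRead grid rb cb "N"
  else if ca = cb ∧ rb = ra - 1 then !pvRead grid ra ca "N" && !pvRead grid rb cb "S"
  else false

def aOpenOr (grid : List (List (List (String × Bool)))) (r c r2 c2 : Int) (d : String)
    (a b : Int × Int) : Bool :=
  let (ra, ca) := a; let (rb, cb) := b
  if ra = rb ∧ cb = ca + 1 then
    aIsOpen grid a b || decide ((ra, ca) = (r, c) ∧ d = "E") || decide ((rb, cb) = (r2, c2) ∧ pvOpp d = "W")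
  else if ra = rb ∧ cb = ca - 1 then
    aIsOpen grid a b || decide ((ra, ca) = (r, c) ∧ d = "W") || decide ((rb, cb) = (r2, c2) ∧ pvOpp d = "E")
  else if ca = cb ∧ rb = ra + 1 then
    aIsOpen grid a b || decide ((ra, ca) = (r, c) ∧ d = "S") || decide ((rb, cb) = (r2, c2) ∧ pvOpp d = "N")
  else if ca = cb ∧ rb = ra - 1 then
    aIsOpen grid a b || decide ((ra, ca) = (r, c) ∧ d = "N") || decide ((rb, cb) = (r2, c2) ∧ pvOpp d = "S")
  else false

def would_make_2x2_room (grid : List (List (List (String × Bool)))) (r : Int) (c : Int) (d : String) : Bool :=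
  let rows : Int := grid.length
  let cols : Int := ((PySem.List.pyGet? grid 0).getD []).length
  let dr := (pvDirs d).1; let dc := (pvDirs d).2
  let r2 := r + dr; let c2 := c + dc
  if !pvInB r2 c2 rows cols then false
  else
    let quads : List ((Int × Int) × (Int × Int) × (Int × Int) × (Int × Int)) :=
      if d = "E" ∨ d = "W" then
        (if pvInB (r - 1) c rows cols && pvInB (r - 1) c2 rows cols then
            [((r, c), (r, c2), (r - 1, c), (r - 1, c2))] else []) ++
        (if pvInB (r + 1) c rows cols && pvInB (r + 1) c2 rows cols then
            [((r, c), (r, c2), (r + 1, c), (r + 1, c2))] else [])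
      else
        (if pvInB r (c - 1) rows cols && pvInB r2 (c - 1) rows cols then
            [((r, c), (r2, c), (r, c - 1), (r2, c - 1))] else []) ++
        (if pvInB r (c + 1) rows cols && pvInB r2 (c + 1) rows cols then
            [((r, c), (r2, c), (r, c + 1), (r2, c + 1))] else [])
    quads.any (fun q =>
      let (qa, qb, qc, qd) := q
      [(qa, qb), (qa, qc), (qd, qb), (qd, qc)].all (fun e => aOpenOr grid r c r2 c2 d e.1 e.2))

-- ===== PORT B =====
-- g[x][y][k] = False on a copy (Python dict assignment: overwrite in place / append a
-- new key). Indices are compared as non-negative Ints — exact here because B assigns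
-- only after its bounds guard, so 0 ≤ x and 0 ≤ y on every assignment B performs.
def bOpen1 (g : List (List (List (String × Bool)))) (x y : Int) (k : String) :
    List (List (List (String × Bool))) :=
  g.mapIdx (fun i row => if (i : Int) = x then
      row.mapIdx (fun j cell => if (j : Int) = y then ((PySem.Dict.mk cell).insert k false).items else cell)
    else row)

def bBlockOpen (g : List (List (List (String × Bool)))) (tr tc : Int) : Bool :=
  !pvRead g tr tc "E" && !pvRead g tr (tc + 1) "W" &&
  !pvRead g (tr + 1) tc "E" && !pvRead g (tr + 1) (tc + 1) "W" &&
  !pvRead g tr tc "S" && !pvRead g (tr + 1) tc "N" &&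
  !pvRead g tr (tc + 1) "S" && !pvRead g (tr + 1) (tc + 1) "N"

-- ends <= block (subset test on the two opened-edge cells)
def bContains (r c r2 c2 tr tc : Int) : Bool :=
  [(r, c), (r2, c2)].all (fun p => [(tr, tc), (tr, tc + 1), (tr + 1, tc), (tr + 1, tc + 1)].contains p)

def would_make_2x2_room_alt (grid : List (List (List (String × Bool)))) (r : Int) (c : Int) (d : String) : Bool :=
  let rows : Int := grid.length
  let cols : Int := ((PySem.List.pyGet? grid 0).getD []).length
  let dr := (pvDirs d).1; let dc := (pvDirs d).2
  let r2 := r + dr; let c2 := c + dc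
  if !decide (0 ≤ r ∧ r < rows ∧ 0 ≤ c ∧ c < cols ∧ 0 ≤ r2 ∧ r2 < rows ∧ 0 ≤ c2 ∧ c2 < cols) then false
  else
    let g := bOpen1 (bOpen1 grid r c d) r2 c2 (pvOpp d)
    (PySem.List.pyRange 0 (rows - 1) 1).any (fun tr =>
      (PySem.List.pyRange 0 (cols - 1) 1).any (fun tc =>
        bContains r c r2 c2 tr tc && bBlockOpen g tr tc))

-- ===== PRECONDITION & SPEC =====
def pvCellOK (grid : List (List (List (String × Bool)))) (x y : Int) : Bool :=
  match PySem.List.pyGet? grid x with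
  | none => false
  | some row =>
    match PySem.List.pyGet? row y with
    | none => false
    | some cell =>
      ((PySem.Dict.mk cell).get? "N").isSome && ((PySem.Dict.mk cell).get? "S").isSome &&
      ((PySem.Dict.mk cell).get? "E").isSome && ((PySem.Dict.mk cell).get? "W").isSome

def pvCellEx (grid : List (List (List (String × Bool)))) (x y : Int) : Bool :=
  match PySem.List.pyGet? grid x with
  | none => false
  | some row => (PySem.List.pyGet? row y).isSome

def pvBlockOK (grid : List (List (List (String × Bool)))) (tr tc : Int) : Bool :=
  pvCellOK grid tr tc && pvCellOK grid tr (tc + 1) &&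
  pvCellOK grid (tr + 1) tc && pvCellOK grid (tr + 1) (tc + 1)

-- Pre_ excludes the inputs on which A raises (direction not in DIRS, empty grid) and the
-- ragged or key-incomplete grids on which B's simulation or scan raises while A's
-- short-circuit evaluation still returns False first: the two cells of the opened edge
-- must exist, and every cell of an examined candidate 2x2 block must exist and carry all
-- four wall keys.
def Pre_would_make_2x2_room (grid : List (List (List (String × Bool)))) (r : Int) (c : Int) (d : String) : Prop :=
  (d = "N" ∨ d = "S" ∨ d = "E" ∨ d = "W") ∧ grid ≠ [] ∧
  (let rows : Int := grid.length
   let cols : Int := ((PySem.List.pyGet? grid 0).getD []).length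
   let r2 := r + (pvDirs d).1; let c2 := c + (pvDirs d).2
   ((0 ≤ r ∧ r < rows ∧ 0 ≤ c ∧ c < cols ∧ 0 ≤ r2 ∧ r2 < rows ∧ 0 ≤ c2 ∧ c2 < cols) →
      pvCellEx grid r c = true ∧ pvCellEx grid r2 c2 = true) ∧
   ((0 ≤ r2 ∧ r2 < rows ∧ 0 ≤ c2 ∧ c2 < cols) →
    ∀ t ∈ (if d = "E" ∨ d = "W" then [((r : Int) - 1, min c c2), (r, min c c2)]
           else [(min r r2, c - 1), (min r r2, c)]),
      (0 ≤ t.1 ∧ t.1 + 1 < rows ∧ 0 ≤ t.2 ∧ t.2 + 1 < cols) → pvBlockOK grid t.1 t.2 = true))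

instance (grid : List (List (List (String × Bool)))) (r : Int) (c : Int) (d : String) : Decidable (Pre_would_make_2x2_room grid r c d) := by unfold Pre_would_make_2x2_room; infer_instance

def pvWitness_would_make_2x2_room : (List (List (List (String × Bool)))) × Int × Int × String :=
  ([[[("N", false), ("S", false), ("E", false), ("W", false)],
     [("N", false), ("S", false), ("E", false), ("W", false)]],
    [[("N", false), ("S", false), ("E", false), ("W", false)],
     [("N", false), ("S", false), ("E", false), ("W", false)]]], 0, 0, "E")

def Spec_would_make_2x2_room (grid : List (List (List (String × Bool)))) (r : Int) (c : Int) (d : String) (out : Bool) : Prop := out = would_make_2x2_room_alt grid r c d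
instance (grid : List (List (List (String × Bool)))) (r : Int) (c : Int) (d : String) (out : Bool) : Decidable (Spec_would_make_2x2_room grid r c d out) := by unfold Spec_would_make_2x2_room; infer_instance

-- ===== CLAIM (what is proved, stated in full; the proofs are below) =====
def Claim_equal_would_make_2x2_room : Prop := ∀ (grid : List (List (List (String × Bool)))) (r : Int) (c : Int) (d : String), Dom_would_make_2x2_room grid r c d → Pre_would_make_2x2_room grid r c d → Spec_would_make_2x2_room grid r c d (would_make_2x2_room grid r c d)

-- ===== LEMMAS AND PROOFS =====

-- collapse of B's double scan: if containment pins (tr,tc) to one of two candidates,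
-- the whole scan equals the disjunction over those two candidates
theorem any_any_contains (R C r c r2 c2 : Int) (op : Int → Int → Bool) (ta tb : Int × Int)
    (hchar : ∀ tr tc, bContains r c r2 c2 tr tc = true ↔ ((tr, tc) = ta ∨ (tr, tc) = tb)) :
    ((PySem.List.pyRange 0 R 1).any fun tr => (PySem.List.pyRange 0 C 1).any fun tc =>
        bContains r c r2 c2 tr tc && op tr tc)
    = ((decide (0 ≤ ta.1 ∧ ta.1 < R ∧ 0 ≤ ta.2 ∧ ta.2 < C) && op ta.1 ta.2)
       || (decide (0 ≤ tb.1 ∧ tb.1 < R ∧ 0 ≤ tb.2 ∧ tb.2 < C) && op tb.1 tb.2)) := by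
  rw [Bool.eq_iff_iff]
  simp only [List.any_eq_true, PySem.List.mem_pyRange_one, Bool.and_eq_true,
    decide_eq_true_eq, Bool.or_eq_true]
  constructor
  · rintro ⟨tr, ⟨h0, h1⟩, tc, ⟨h2, h3⟩, hcont, hop⟩
    rcases (hchar tr tc).1 hcont with he | he
    · left; rw [← he]; exact ⟨⟨h0, h1, h2, h3⟩, hop⟩
    · right; rw [← he]; exact ⟨⟨h0, h1, h2, h3⟩, hop⟩
  · rintro (⟨⟨a0, a1, a2, a3⟩, hop⟩ | ⟨⟨a0, a1, a2, a3⟩, hop⟩)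
    · exact ⟨ta.1, ⟨a0, a1⟩, ta.2, ⟨a2, a3⟩, (hchar _ _).2 (Or.inl rfl), hop⟩
    · exact ⟨tb.1, ⟨a0, a1⟩, tb.2, ⟨a2, a3⟩, (hchar _ _).2 (Or.inr rfl), hop⟩

theorem bContains_iff (r c r2 c2 tr tc : Int) :
    bContains r c r2 c2 tr tc = true ↔
      ((tr = r ∨ tr + 1 = r) ∧ (tc = c ∨ tc + 1 = c)) ∧
      ((tr = r2 ∨ tr + 1 = r2) ∧ (tc = c2 ∨ tc + 1 = c2)) := by
  simp [bContains, Prod.ext_iff]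
  omega

-- reading the mutated grid: the assigned flag reads False, everything else is unchanged
theorem pvRead_bOpen1 (g : List (List (List (String × Bool)))) (x y : Int) (k : String)
    (u v : Int) (m : String) (hu : 0 ≤ u) (hv : 0 ≤ v) :
    pvRead (bOpen1 g x y k) u v m
      = if u = x ∧ v = y ∧ m = k then false else pvRead g u v m := by
  unfold pvRead bOpen1
  rw [PySem.List.pyGet?_of_nonneg _ hu, PySem.List.pyGet?_of_nonneg _ hu, List.getElem?_mapIdx]
  rcases hg : g[u.toNat]? with _ | row
  · simp
  · simp only [Option.map_some]
    rw [Int.toNat_of_nonneg hu]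
    by_cases hx : u = x
    · rw [if_pos hx]
      rw [PySem.List.pyGet?_of_nonneg _ hv, PySem.List.pyGet?_of_nonneg _ hv, List.getElem?_mapIdx]
      rcases hr : row[v.toNat]? with _ | cell
      · simp
      · simp only [Option.map_some]
        rw [Int.toNat_of_nonneg hv]
        by_cases hy : v = y
        · rw [if_pos hy]
          by_cases hm : m = k
          · subst hm
            rw [if_pos ⟨hx, hy, rfl⟩]
            have : (PySem.Dict.mk (((PySem.Dict.mk cell).insert m false).items)).get? m
                = ((PySem.Dict.mk cell).insert m false).get? m := rfl
            rw [this, PySem.Dict.get?_insert_self]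
            rfl
          · rw [if_neg (by tauto)]
            have : (PySem.Dict.mk (((PySem.Dict.mk cell).insert k false).items)).get? m
                = ((PySem.Dict.mk cell).insert k false).get? m := rfl
            rw [this, PySem.Dict.get?_insert_of_ne _ _ hm]
        · rw [if_neg hy, if_neg (by tauto)]
    · rw [if_neg hx, if_neg (by tauto)]

set_option maxHeartbeats 1600000 in
theorem eq_E (grid : List (List (List (String × Bool)))) (r c : Int) :
    would_make_2x2_room grid r c "E" = would_make_2x2_room_alt grid r c "E" := by
  simp [would_make_2x2_room, would_make_2x2_room_alt, pvDirs, pvOpp, pvInB]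
  generalize hR : (grid.length : ℤ) = R
  generalize hC : (((PySem.List.pyGet? grid 0).getD []).length : ℤ) = C
  by_cases h0 : 0 ≤ r
  case neg => simp [show (r < 0) = True by simp; omega]
  by_cases h1 : r < R
  case neg => simp [show (R ≤ r) = True by simp; omega]
  by_cases h2 : c + 1 < C
  case neg => simp [show (C ≤ c + 1) = True by simp; omega]
  by_cases hc : 0 ≤ c
  case neg =>
    simp [show (c < 0) = True by simp; omega, show ((0:ℤ) ≤ c) = False by simp; omega]
  simp only [show (r < 0) = False by simp; omega, show (R ≤ r) = False by simp; omega,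
    show (c + 1 < 0) = False by simp; omega, show (C ≤ c + 1) = False by simp; omega,
    show (c < 0) = False by simp; omega, show (C ≤ c) = False by simp; omega,
    decide_false, Bool.not_false, Bool.true_and]
  rw [any_any_contains (R - 1) (C - 1) r c r (c + 1) _ ((r : ℤ) - 1, c) (r, c)
    (by intro tr tc; rw [bContains_iff]; simp only [Prod.mk.injEq]; omega)]
  dsimp only
  generalize hGG : bOpen1 (bOpen1 grid r c "E") r (c + 1) "W" = G
  have hG : ∀ u v : Int, 0 ≤ u → 0 ≤ v → ∀ m : String,
      pvRead G u v m
        = if u = r ∧ v = c + 1 ∧ m = "W" then false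
          else if u = r ∧ v = c ∧ m = "E" then false else pvRead grid u v m := by
    intro u v hu hv m
    rw [← hGG, pvRead_bOpen1 _ _ _ _ _ _ _ hu hv, pvRead_bOpen1 _ _ _ _ _ _ _ hu hv]
  have hb1 : 1 ≤ r → bBlockOpen G (r - 1) c
      = (!pvRead grid (r - 1) c "E" && !pvRead grid (r - 1) (c + 1) "W"
         && !pvRead grid (r - 1) c "S" && !pvRead grid r c "N"
         && !pvRead grid (r - 1) (c + 1) "S" && !pvRead grid r (c + 1) "N") := by
    intro hr1
    simp only [bBlockOpen, sub_add_cancel, hG (r - 1) c (by omega) (by omega),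
      hG (r - 1) (c + 1) (by omega) (by omega), hG r c (by omega) (by omega),
      hG r (c + 1) (by omega) (by omega)]
    simp [show (r:ℤ) - 1 ≠ r by omega, show c ≠ (c:ℤ) + 1 by omega, Bool.and_assoc]
  have hb2 : bBlockOpen G r c
      = (!pvRead grid (r + 1) c "E" && !pvRead grid (r + 1) (c + 1) "W"
         && !pvRead grid r c "S" && !pvRead grid (r + 1) c "N"
         && !pvRead grid r (c + 1) "S" && !pvRead grid (r + 1) (c + 1) "N") := by
    simp only [bBlockOpen, hG r c (by omega) (by omega),
      hG r (c + 1) (by omega) (by omega), hG (r + 1) c (by omega) (by omega),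
      hG (r + 1) (c + 1) (by omega) (by omega)]
    simp [show (r:ℤ) + 1 ≠ r by omega, show c ≠ (c:ℤ) + 1 by omega, Bool.and_assoc]
  have ha0 : aOpenOr grid r c r (c + 1) "E" (r, c) (r, c + 1) = true := by
    simp [aOpenOr, Prod.ext_iff]
  have ha2 : aOpenOr grid r c r (c + 1) "E" (r, c) ((r:ℤ) - 1, c)
      = (!pvRead grid r c "N" && !pvRead grid (r - 1) c "S") := by
    simp [aOpenOr, aIsOpen, pvOpp, Prod.ext_iff, show r ≠ (r:ℤ) - 1 by omega,
      show (r:ℤ) - 1 ≠ r + 1 by omega]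
  have ha3 : aOpenOr grid r c r (c + 1) "E" ((r:ℤ) - 1, c + 1) (r, c + 1)
      = (!pvRead grid (r - 1) (c + 1) "S" && !pvRead grid r (c + 1) "N") := by
    simp [aOpenOr, aIsOpen, pvOpp, Prod.ext_iff, show (r:ℤ) - 1 ≠ r by omega,
      sub_add_cancel]
  have ha4 : aOpenOr grid r c r (c + 1) "E" ((r:ℤ) - 1, c + 1) ((r:ℤ) - 1, c)
      = (!pvRead grid (r - 1) (c + 1) "W" && !pvRead grid (r - 1) c "E") := by
    simp [aOpenOr, aIsOpen, pvOpp, Prod.ext_iff, show (r:ℤ) - 1 ≠ r by omega,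
      show c ≠ (c:ℤ) + 1 + 1 by omega, show ((c:ℤ) + 1) - 1 = c by omega]
  have hf2 : aOpenOr grid r c r (c + 1) "E" (r, c) ((r:ℤ) + 1, c)
      = (!pvRead grid r c "S" && !pvRead grid (r + 1) c "N") := by
    simp [aOpenOr, aIsOpen, pvOpp, Prod.ext_iff, show r ≠ (r:ℤ) + 1 by omega,
      show (r:ℤ) + 1 ≠ r - 1 by omega]
  have hf3 : aOpenOr grid r c r (c + 1) "E" ((r:ℤ) + 1, c + 1) (r, c + 1)
      = (!pvRead grid (r + 1) (c + 1) "N" && !pvRead grid r (c + 1) "S") := by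
    simp [aOpenOr, aIsOpen, pvOpp, Prod.ext_iff, show (r:ℤ) + 1 ≠ r by omega,
      show r ≠ (r:ℤ) + 1 + 1 by omega, show ((r:ℤ) + 1) - 1 = r by omega]
  have hf4 : aOpenOr grid r c r (c + 1) "E" ((r:ℤ) + 1, c + 1) ((r:ℤ) + 1, c)
      = (!pvRead grid (r + 1) (c + 1) "W" && !pvRead grid (r + 1) c "E") := by
    simp [aOpenOr, aIsOpen, pvOpp, Prod.ext_iff, show (r:ℤ) + 1 ≠ r by omega,
      show c ≠ (c:ℤ) + 1 + 1 by omega, show ((c:ℤ) + 1) - 1 = c by omega]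
  by_cases hq1 : 1 ≤ r <;> by_cases hq2 : r + 1 < R
  · rw [hb1 hq1, hb2]
    simp [show ((1:ℤ) ≤ r) = True by simp; omega, show (r ≤ R) = True by simp; omega,
      show ((0:ℤ) ≤ c) = True by simp; omega, show (c < C) = True by simp; omega,
      show ((0:ℤ) ≤ c + 1) = True by simp; omega, show ((0:ℤ) ≤ r + 1) = True by simp; omega,
      show (r + 1 < R) = True by simp; omega,
      show (r - 1 < R - 1) = True by simp; omega, show (r < R - 1) = True by simp; omega,
      show (c < C - 1) = True by simp; omega, show ((0:ℤ) ≤ r) = True by simp; omega,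
      show ((0:ℤ) ≤ r - 1) = True by simp; omega,
      h0, h1, h2, hc, hq1, hq2, ha0, ha2, ha3, ha4, hf2, hf3, hf4,
      Bool.and_left_comm, Bool.and_comm, Bool.and_assoc]
  · rw [hb1 hq1]
    simp [show ((1:ℤ) ≤ r) = True by simp; omega, show (r ≤ R) = True by simp; omega,
      show ((0:ℤ) ≤ c) = True by simp; omega, show (c < C) = True by simp; omega,
      show ((0:ℤ) ≤ c + 1) = True by simp; omega,
      show (r + 1 < R) = False by simp; omega,
      show (r - 1 < R - 1) = True by simp; omega, show (r < R - 1) = False by simp; omega,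
      show (c < C - 1) = True by simp; omega,
      show ((0:ℤ) ≤ r - 1) = True by simp; omega,
      h0, h1, h2, hc, hq1, ha0, ha2, ha3, ha4,
      Bool.and_left_comm, Bool.and_comm, Bool.and_assoc]
  · rw [hb2]
    simp [show ((1:ℤ) ≤ r) = False by simp; omega,
      show ((0:ℤ) ≤ c) = True by simp; omega, show (c < C) = True by simp; omega,
      show ((0:ℤ) ≤ c + 1) = True by simp; omega, show ((0:ℤ) ≤ r + 1) = True by simp; omega,
      show (r + 1 < R) = True by simp; omega,
      show (r < R - 1) = True by simp; omega,
      show (c < C - 1) = True by simp; omega, show ((0:ℤ) ≤ r) = True by simp; omega,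
      show ((0:ℤ) ≤ r - 1) = False by simp; omega,
      h0, h1, h2, hc, hq2, ha0, hf2, hf3, hf4,
      Bool.and_left_comm, Bool.and_comm, Bool.and_assoc]
  · simp [show ((1:ℤ) ≤ r) = False by simp; omega,
      show (r + 1 < R) = False by simp; omega, show (r < R - 1) = False by simp; omega,
      show ((0:ℤ) ≤ r - 1) = False by simp; omega]
set_option maxHeartbeats 1600000 in
theorem eq_W (grid : List (List (List (String × Bool)))) (r c : Int) :
    would_make_2x2_room grid r c "W" = would_make_2x2_room_alt grid r c "W" := by
  simp [would_make_2x2_room, would_make_2x2_room_alt, pvDirs, pvOpp, pvInB]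
  generalize hR : (grid.length : ℤ) = R
  generalize hC : (((PySem.List.pyGet? grid 0).getD []).length : ℤ) = C
  simp only [show (c : ℤ) + -1 = c - 1 from by ring]
  by_cases h0 : 0 ≤ r
  case neg => simp [show (r < 0) = True by simp; omega]
  by_cases h1 : r < R
  case neg => simp [show (R ≤ r) = True by simp; omega]
  by_cases h2 : 1 ≤ c
  case neg => simp [show (c < 1) = True by simp; omega]
  by_cases h3 : c ≤ C
  case neg => simp [show (C < c) = True by simp; omega]
  by_cases hcc : c < C
  case neg =>
    simp [show (C ≤ c) = True by simp; omega, show (c < C) = False by simp; omega]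
  simp only [show (r < 0) = False by simp; omega, show (R ≤ r) = False by simp; omega,
    show (c < 1) = False by simp; omega, show (C < c) = False by simp; omega,
    show (c < 0) = False by simp; omega, show (C ≤ c) = False by simp; omega,
    decide_false, Bool.not_false, Bool.true_and]
  rw [any_any_contains (R - 1) (C - 1) r c r (c - 1) _ ((r : ℤ) - 1, (c : ℤ) - 1) (r, (c : ℤ) - 1)
    (by intro tr tc; rw [bContains_iff]; simp only [Prod.mk.injEq]; omega)]
  dsimp only
  generalize hGG : bOpen1 (bOpen1 grid r c "W") r (c - 1) "E" = G
  have hG : ∀ u v : Int, 0 ≤ u → 0 ≤ v → ∀ m : String,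
      pvRead G u v m
        = if u = r ∧ v = c - 1 ∧ m = "E" then false
          else if u = r ∧ v = c ∧ m = "W" then false else pvRead grid u v m := by
    intro u v hu hv m
    rw [← hGG, pvRead_bOpen1 _ _ _ _ _ _ _ hu hv, pvRead_bOpen1 _ _ _ _ _ _ _ hu hv]
  have hb1 : 1 ≤ r → bBlockOpen G (r - 1) (c - 1)
      = (!pvRead grid (r - 1) (c - 1) "E" && !pvRead grid (r - 1) c "W"
         && !pvRead grid (r - 1) (c - 1) "S" && !pvRead grid r (c - 1) "N"
         && !pvRead grid (r - 1) c "S" && !pvRead grid r c "N") := by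
    intro hr1
    simp only [bBlockOpen, sub_add_cancel, hG (r - 1) (c - 1) (by omega) (by omega),
      hG (r - 1) c (by omega) (by omega), hG r (c - 1) (by omega) (by omega),
      hG r c (by omega) (by omega)]
    simp [show (r:ℤ) - 1 ≠ r by omega, show c ≠ (c:ℤ) - 1 by omega, Bool.and_assoc]
  have hb2 : bBlockOpen G r (c - 1)
      = (!pvRead grid (r + 1) (c - 1) "E" && !pvRead grid (r + 1) c "W"
         && !pvRead grid r (c - 1) "S" && !pvRead grid (r + 1) (c - 1) "N"
         && !pvRead grid r c "S" && !pvRead grid (r + 1) c "N") := by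
    simp only [bBlockOpen, sub_add_cancel, hG r (c - 1) (by omega) (by omega),
      hG r c (by omega) (by omega), hG (r + 1) (c - 1) (by omega) (by omega),
      hG (r + 1) c (by omega) (by omega)]
    simp [show (r:ℤ) + 1 ≠ r by omega, show c ≠ (c:ℤ) - 1 by omega, Bool.and_assoc]
  have ha0 : aOpenOr grid r c r (c - 1) "W" (r, c) (r, (c:ℤ) - 1) = true := by
    simp [aOpenOr, Prod.ext_iff, show (c:ℤ) - 1 ≠ c + 1 by omega]
  have ha2 : aOpenOr grid r c r (c - 1) "W" (r, c) ((r:ℤ) - 1, c)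
      = (!pvRead grid r c "N" && !pvRead grid (r - 1) c "S") := by
    simp [aOpenOr, aIsOpen, pvOpp, Prod.ext_iff, show r ≠ (r:ℤ) - 1 by omega,
      show (r:ℤ) - 1 ≠ r + 1 by omega]
  have ha3 : aOpenOr grid r c r (c - 1) "W" ((r:ℤ) - 1, (c:ℤ) - 1) (r, (c:ℤ) - 1)
      = (!pvRead grid (r - 1) (c - 1) "S" && !pvRead grid r (c - 1) "N") := by
    simp [aOpenOr, aIsOpen, pvOpp, Prod.ext_iff, show (r:ℤ) - 1 ≠ r by omega,
      sub_add_cancel]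
  have ha4 : aOpenOr grid r c r (c - 1) "W" ((r:ℤ) - 1, (c:ℤ) - 1) ((r:ℤ) - 1, c)
      = (!pvRead grid (r - 1) (c - 1) "E" && !pvRead grid (r - 1) c "W") := by
    simp [aOpenOr, aIsOpen, pvOpp, Prod.ext_iff, show (r:ℤ) - 1 ≠ r by omega,
      sub_add_cancel, show c ≠ (c:ℤ) - 1 - 1 by omega]
  have hf2 : aOpenOr grid r c r (c - 1) "W" (r, c) ((r:ℤ) + 1, c)
      = (!pvRead grid r c "S" && !pvRead grid (r + 1) c "N") := by
    simp [aOpenOr, aIsOpen, pvOpp, Prod.ext_iff, show r ≠ (r:ℤ) + 1 by omega,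
      show (r:ℤ) + 1 ≠ r - 1 by omega]
  have hf3 : aOpenOr grid r c r (c - 1) "W" ((r:ℤ) + 1, (c:ℤ) - 1) (r, (c:ℤ) - 1)
      = (!pvRead grid (r + 1) (c - 1) "N" && !pvRead grid r (c - 1) "S") := by
    simp [aOpenOr, aIsOpen, pvOpp, Prod.ext_iff, show (r:ℤ) + 1 ≠ r by omega,
      show r ≠ (r:ℤ) + 1 + 1 by omega, show ((r:ℤ) + 1) - 1 = r by omega]
  have hf4 : aOpenOr grid r c r (c - 1) "W" ((r:ℤ) + 1, (c:ℤ) - 1) ((r:ℤ) + 1, c)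
      = (!pvRead grid (r + 1) (c - 1) "E" && !pvRead grid (r + 1) c "W") := by
    simp [aOpenOr, aIsOpen, pvOpp, Prod.ext_iff, show (r:ℤ) + 1 ≠ r by omega,
      sub_add_cancel, show c ≠ (c:ℤ) - 1 - 1 by omega]
  by_cases hq1 : 1 ≤ r <;> by_cases hq2 : r + 1 < R
  · rw [hb1 hq1, hb2]
    simp [show ((1:ℤ) ≤ r) = True by simp; omega, show (r ≤ R) = True by simp; omega,
      show ((0:ℤ) ≤ c) = True by simp; omega, show (c ≤ C) = True by simp; omega,
      show ((0:ℤ) ≤ r + 1) = True by simp; omega, show (r + 1 < R) = True by simp; omega,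
      show (r - 1 < R - 1) = True by simp; omega, show (r < R - 1) = True by simp; omega,
      show (c - 1 < C - 1) = True by simp; omega, show ((0:ℤ) ≤ r) = True by simp; omega,
      show ((0:ℤ) ≤ r - 1) = True by simp; omega, show ((0:ℤ) ≤ c - 1) = True by simp; omega,
      h0, h1, h2, h3, hcc, hq1, hq2, ha0, ha2, ha3, ha4, hf2, hf3, hf4,
      Bool.and_left_comm, Bool.and_comm, Bool.and_assoc]
  · rw [hb1 hq1]
    simp [show ((1:ℤ) ≤ r) = True by simp; omega, show (r ≤ R) = True by simp; omega,
      show ((0:ℤ) ≤ c) = True by simp; omega, show (c ≤ C) = True by simp; omega,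
      show (r + 1 < R) = False by simp; omega,
      show (r - 1 < R - 1) = True by simp; omega, show (r < R - 1) = False by simp; omega,
      show (c - 1 < C - 1) = True by simp; omega,
      show ((0:ℤ) ≤ r - 1) = True by simp; omega, show ((0:ℤ) ≤ c - 1) = True by simp; omega,
      h0, h1, h2, h3, hcc, hq1, ha0, ha2, ha3, ha4,
      Bool.and_left_comm, Bool.and_comm, Bool.and_assoc]
  · rw [hb2]
    simp [show ((1:ℤ) ≤ r) = False by simp; omega,
      show ((0:ℤ) ≤ c) = True by simp; omega, show (c ≤ C) = True by simp; omega,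
      show ((0:ℤ) ≤ r + 1) = True by simp; omega, show (r + 1 < R) = True by simp; omega,
      show (r < R - 1) = True by simp; omega,
      show (c - 1 < C - 1) = True by simp; omega, show ((0:ℤ) ≤ r) = True by simp; omega,
      show ((0:ℤ) ≤ r - 1) = False by simp; omega, show ((0:ℤ) ≤ c - 1) = True by simp; omega,
      h0, h1, h2, h3, hcc, hq2, ha0, hf2, hf3, hf4,
      Bool.and_left_comm, Bool.and_comm, Bool.and_assoc]
  · simp [show ((1:ℤ) ≤ r) = False by simp; omega,
      show (r + 1 < R) = False by simp; omega, show (r < R - 1) = False by simp; omega,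
      show ((0:ℤ) ≤ r - 1) = False by simp; omega]
set_option maxHeartbeats 1600000 in
theorem eq_S (grid : List (List (List (String × Bool)))) (r c : Int) :
    would_make_2x2_room grid r c "S" = would_make_2x2_room_alt grid r c "S" := by
  simp [would_make_2x2_room, would_make_2x2_room_alt, pvDirs, pvOpp, pvInB]
  generalize hR : (grid.length : ℤ) = R
  generalize hC : (((PySem.List.pyGet? grid 0).getD []).length : ℤ) = C
  by_cases h0 : 0 ≤ r + 1
  case neg => simp [show (r + 1 < 0) = True by simp; omega]
  by_cases h1 : r + 1 < R
  case neg => simp [show (R ≤ r + 1) = True by simp; omega]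
  by_cases h2 : 0 ≤ c
  case neg => simp [show (c < 0) = True by simp; omega]
  by_cases h3 : c < C
  case neg => simp [show (C ≤ c) = True by simp; omega]
  by_cases hr0 : 0 ≤ r
  case neg =>
    simp [show (r < 0) = True by simp; omega, show ((0:ℤ) ≤ r) = False by simp; omega]
  simp only [show (r + 1 < 0) = False by simp; omega, show (R ≤ r + 1) = False by simp; omega,
    show (c < 0) = False by simp; omega, show (C ≤ c) = False by simp; omega,
    show (r < 0) = False by simp; omega, show (R ≤ r) = False by simp; omega,
    decide_false, Bool.not_false, Bool.true_and]
  rw [any_any_contains (R - 1) (C - 1) r c (r + 1) c _ (r, (c : ℤ) - 1) (r, c)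
    (by intro tr tc; rw [bContains_iff]; simp only [Prod.mk.injEq]; omega)]
  dsimp only
  generalize hGG : bOpen1 (bOpen1 grid r c "S") (r + 1) c "N" = G
  have hG : ∀ u v : Int, 0 ≤ u → 0 ≤ v → ∀ m : String,
      pvRead G u v m
        = if u = r + 1 ∧ v = c ∧ m = "N" then false
          else if u = r ∧ v = c ∧ m = "S" then false else pvRead grid u v m := by
    intro u v hu hv m
    rw [← hGG, pvRead_bOpen1 _ _ _ _ _ _ _ hu hv, pvRead_bOpen1 _ _ _ _ _ _ _ hu hv]
  have hb1 : 1 ≤ c → bBlockOpen G r (c - 1)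
      = (!pvRead grid r (c - 1) "E" && !pvRead grid r c "W"
         && !pvRead grid (r + 1) (c - 1) "E" && !pvRead grid (r + 1) c "W"
         && !pvRead grid r (c - 1) "S" && !pvRead grid (r + 1) (c - 1) "N") := by
    intro hc1
    simp only [bBlockOpen, sub_add_cancel, hG r (c - 1) (by omega) (by omega),
      hG r c (by omega) (by omega), hG (r + 1) (c - 1) (by omega) (by omega),
      hG (r + 1) c (by omega) (by omega)]
    simp [show r ≠ (r:ℤ) + 1 by omega, show (r:ℤ) + 1 ≠ r by omega,
      show c ≠ (c:ℤ) - 1 by omega, show (c:ℤ) - 1 ≠ c by omega, Bool.and_assoc]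
  have hb2 : bBlockOpen G r c
      = (!pvRead grid r c "E" && !pvRead grid r (c + 1) "W"
         && !pvRead grid (r + 1) c "E" && !pvRead grid (r + 1) (c + 1) "W"
         && !pvRead grid r (c + 1) "S" && !pvRead grid (r + 1) (c + 1) "N") := by
    simp only [bBlockOpen, hG r c (by omega) (by omega),
      hG r (c + 1) (by omega) (by omega), hG (r + 1) c (by omega) (by omega),
      hG (r + 1) (c + 1) (by omega) (by omega)]
    simp [show r ≠ (r:ℤ) + 1 by omega, show (r:ℤ) + 1 ≠ r by omega,
      show c ≠ (c:ℤ) + 1 by omega, show (c:ℤ) + 1 ≠ c by omega, Bool.and_assoc]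
  have ha0 : aOpenOr grid r c (r + 1) c "S" (r, c) ((r:ℤ) + 1, c) = true := by
    simp [aOpenOr, Prod.ext_iff, show r ≠ (r:ℤ) + 1 by omega,
      show (r:ℤ) + 1 ≠ r - 1 by omega]
  have ha2 : aOpenOr grid r c (r + 1) c "S" (r, c) (r, (c:ℤ) - 1)
      = (!pvRead grid r c "W" && !pvRead grid r (c - 1) "E") := by
    simp [aOpenOr, aIsOpen, pvOpp, Prod.ext_iff, show (c:ℤ) - 1 ≠ c + 1 by omega,
      show r ≠ (r:ℤ) + 1 by omega]
  have ha3 : aOpenOr grid r c (r + 1) c "S" ((r:ℤ) + 1, (c:ℤ) - 1) ((r:ℤ) + 1, c)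
      = (!pvRead grid (r + 1) (c - 1) "E" && !pvRead grid (r + 1) c "W") := by
    simp [aOpenOr, aIsOpen, pvOpp, Prod.ext_iff, show (r:ℤ) + 1 ≠ r by omega,
      sub_add_cancel]
  have ha4 : aOpenOr grid r c (r + 1) c "S" ((r:ℤ) + 1, (c:ℤ) - 1) (r, (c:ℤ) - 1)
      = (!pvRead grid (r + 1) (c - 1) "N" && !pvRead grid r (c - 1) "S") := by
    simp [aOpenOr, aIsOpen, pvOpp, Prod.ext_iff, show (r:ℤ) + 1 ≠ r by omega,
      show r ≠ (r:ℤ) + 1 by omega, show ((r:ℤ) + 1) - 1 = r by omega,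
      show r ≠ (r:ℤ) + 1 + 1 by omega, show c ≠ (c:ℤ) - 1 by omega]
  have hf2 : aOpenOr grid r c (r + 1) c "S" (r, c) (r, (c:ℤ) + 1)
      = (!pvRead grid r c "E" && !pvRead grid r (c + 1) "W") := by
    simp [aOpenOr, aIsOpen, pvOpp, Prod.ext_iff, show r ≠ (r:ℤ) + 1 by omega,
      show c ≠ (c:ℤ) + 1 by omega]
  have hf3 : aOpenOr grid r c (r + 1) c "S" ((r:ℤ) + 1, (c:ℤ) + 1) ((r:ℤ) + 1, c)
      = (!pvRead grid (r + 1) (c + 1) "W" && !pvRead grid (r + 1) c "E") := by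
    simp [aOpenOr, aIsOpen, pvOpp, Prod.ext_iff, show (r:ℤ) + 1 ≠ r by omega,
      show c ≠ (c:ℤ) + 1 + 1 by omega, show ((c:ℤ) + 1) - 1 = c by omega]
  have hf4 : aOpenOr grid r c (r + 1) c "S" ((r:ℤ) + 1, (c:ℤ) + 1) (r, (c:ℤ) + 1)
      = (!pvRead grid (r + 1) (c + 1) "N" && !pvRead grid r (c + 1) "S") := by
    simp [aOpenOr, aIsOpen, pvOpp, Prod.ext_iff, show (r:ℤ) + 1 ≠ r by omega,
      show r ≠ (r:ℤ) + 1 by omega, show ((r:ℤ) + 1) - 1 = r by omega,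
      show r ≠ (r:ℤ) + 1 + 1 by omega, show c ≠ (c:ℤ) + 1 by omega]
  by_cases hq1 : 1 ≤ c <;> by_cases hq2 : c + 1 < C
  · rw [hb1 hq1, hb2]
    simp [show ((1:ℤ) ≤ c) = True by simp; omega, show (c ≤ C) = True by simp; omega,
      show ((0:ℤ) ≤ c + 1) = True by simp; omega, show (c + 1 < C) = True by simp; omega,
      show (c - 1 < C - 1) = True by simp; omega, show (c < C - 1) = True by simp; omega,
      show (r < R - 1) = True by simp; omega, show ((0:ℤ) ≤ c - 1) = True by simp; omega,
      show (r ≤ R) = True by simp; omega, show (r + 1 ≤ R) = True by simp; omega,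
      show (r < R) = True by simp; omega, show (r < R) = True by simp; omega, h0, h1, h2, h3, hr0, hq1, hq2, ha0, ha2, ha3, ha4, hf2, hf3, hf4,
      Bool.and_left_comm, Bool.and_comm, Bool.and_assoc]
  · rw [hb1 hq1]
    simp [show ((1:ℤ) ≤ c) = True by simp; omega, show (c ≤ C) = True by simp; omega,
      show (c + 1 < C) = False by simp; omega,
      show (c - 1 < C - 1) = True by simp; omega, show (c < C - 1) = False by simp; omega,
      show (r < R - 1) = True by simp; omega, show ((0:ℤ) ≤ c - 1) = True by simp; omega,
      show (r ≤ R) = True by simp; omega, show (r + 1 ≤ R) = True by simp; omega,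
      show (r < R) = True by simp; omega, h0, h1, h2, h3, hr0, hq1, ha0, ha2, ha3, ha4,
      Bool.and_left_comm, Bool.and_comm, Bool.and_assoc]
  · rw [hb2]
    simp [show ((1:ℤ) ≤ c) = False by simp; omega,
      show ((0:ℤ) ≤ c + 1) = True by simp; omega, show (c + 1 < C) = True by simp; omega,
      show (c < C - 1) = True by simp; omega,
      show (r < R - 1) = True by simp; omega,
      show (r ≤ R) = True by simp; omega, show (r + 1 ≤ R) = True by simp; omega,
      show ((0:ℤ) ≤ c - 1) = False by simp; omega,
      show (r < R) = True by simp; omega, h0, h1, h2, h3, hr0, hq2, ha0, hf2, hf3, hf4,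
      Bool.and_left_comm, Bool.and_comm, Bool.and_assoc]
  · simp [show ((1:ℤ) ≤ c) = False by simp; omega,
      show (c + 1 < C) = False by simp; omega, show (c < C - 1) = False by simp; omega,
      show ((0:ℤ) ≤ c - 1) = False by simp; omega]
set_option maxHeartbeats 1600000 in
theorem eq_N (grid : List (List (List (String × Bool)))) (r c : Int) :
    would_make_2x2_room grid r c "N" = would_make_2x2_room_alt grid r c "N" := by
  simp [would_make_2x2_room, would_make_2x2_room_alt, pvDirs, pvOpp, pvInB]
  generalize hR : (grid.length : ℤ) = R
  generalize hC : (((PySem.List.pyGet? grid 0).getD []).length : ℤ) = C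
  simp only [show (r : ℤ) + -1 = r - 1 from by ring]
  by_cases h0 : 1 ≤ r
  case neg => simp [show (r < 1) = True by simp; omega]
  by_cases h1 : r ≤ R
  case neg => simp [show (R < r) = True by simp; omega]
  by_cases h2 : 0 ≤ c
  case neg => simp [show (c < 0) = True by simp; omega]
  by_cases h3 : c < C
  case neg => simp [show (C ≤ c) = True by simp; omega]
  by_cases hrR : r < R
  case neg =>
    simp [show (R ≤ r) = True by simp; omega, show (r < R) = False by simp; omega]
  simp only [show (r < 1) = False by simp; omega, show (R < r) = False by simp; omega,
    show (c < 0) = False by simp; omega, show (C ≤ c) = False by simp; omega,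
    show (r < 0) = False by simp; omega, show (R ≤ r) = False by simp; omega,
    decide_false, Bool.not_false, Bool.true_and]
  rw [any_any_contains (R - 1) (C - 1) r c (r - 1) c _ ((r : ℤ) - 1, (c : ℤ) - 1) ((r : ℤ) - 1, c)
    (by intro tr tc; rw [bContains_iff]; simp only [Prod.mk.injEq]; omega)]
  dsimp only
  generalize hGG : bOpen1 (bOpen1 grid r c "N") (r - 1) c "S" = G
  have hG : ∀ u v : Int, 0 ≤ u → 0 ≤ v → ∀ m : String,
      pvRead G u v m
        = if u = r - 1 ∧ v = c ∧ m = "S" then false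
          else if u = r ∧ v = c ∧ m = "N" then false else pvRead grid u v m := by
    intro u v hu hv m
    rw [← hGG, pvRead_bOpen1 _ _ _ _ _ _ _ hu hv, pvRead_bOpen1 _ _ _ _ _ _ _ hu hv]
  have hb1 : 1 ≤ c → bBlockOpen G (r - 1) (c - 1)
      = (!pvRead grid (r - 1) (c - 1) "E" && !pvRead grid (r - 1) c "W"
         && !pvRead grid r (c - 1) "E" && !pvRead grid r c "W"
         && !pvRead grid (r - 1) (c - 1) "S" && !pvRead grid r (c - 1) "N") := by
    intro hc1
    simp only [bBlockOpen, sub_add_cancel, hG (r - 1) (c - 1) (by omega) (by omega),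
      hG (r - 1) c (by omega) (by omega), hG r (c - 1) (by omega) (by omega),
      hG r c (by omega) (by omega)]
    simp [show r ≠ (r:ℤ) - 1 by omega, show (r:ℤ) - 1 ≠ r by omega,
      show c ≠ (c:ℤ) - 1 by omega, show (c:ℤ) - 1 ≠ c by omega, Bool.and_assoc]
  have hb2 : bBlockOpen G (r - 1) c
      = (!pvRead grid (r - 1) c "E" && !pvRead grid (r - 1) (c + 1) "W"
         && !pvRead grid r c "E" && !pvRead grid r (c + 1) "W"
         && !pvRead grid (r - 1) (c + 1) "S" && !pvRead grid r (c + 1) "N") := by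
    simp only [bBlockOpen, sub_add_cancel, hG (r - 1) c (by omega) (by omega),
      hG (r - 1) (c + 1) (by omega) (by omega), hG r c (by omega) (by omega),
      hG r (c + 1) (by omega) (by omega)]
    simp [show r ≠ (r:ℤ) - 1 by omega, show (r:ℤ) - 1 ≠ r by omega,
      show c ≠ (c:ℤ) + 1 by omega, show (c:ℤ) + 1 ≠ c by omega, Bool.and_assoc]
  have ha0 : aOpenOr grid r c (r - 1) c "N" (r, c) ((r:ℤ) - 1, c) = true := by
    simp [aOpenOr, Prod.ext_iff, show r ≠ (r:ℤ) - 1 by omega,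
      show (r:ℤ) - 1 ≠ r + 1 by omega]
  have ha2 : aOpenOr grid r c (r - 1) c "N" (r, c) (r, (c:ℤ) - 1)
      = (!pvRead grid r c "W" && !pvRead grid r (c - 1) "E") := by
    simp [aOpenOr, aIsOpen, pvOpp, Prod.ext_iff, show (c:ℤ) - 1 ≠ c + 1 by omega,
      show r ≠ (r:ℤ) - 1 by omega]
  have ha3 : aOpenOr grid r c (r - 1) c "N" ((r:ℤ) - 1, (c:ℤ) - 1) ((r:ℤ) - 1, c)
      = (!pvRead grid (r - 1) (c - 1) "E" && !pvRead grid (r - 1) c "W") := by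
    simp [aOpenOr, aIsOpen, pvOpp, Prod.ext_iff, show (r:ℤ) - 1 ≠ r by omega,
      sub_add_cancel]
  have ha4 : aOpenOr grid r c (r - 1) c "N" ((r:ℤ) - 1, (c:ℤ) - 1) (r, (c:ℤ) - 1)
      = (!pvRead grid (r - 1) (c - 1) "S" && !pvRead grid r (c - 1) "N") := by
    simp [aOpenOr, aIsOpen, pvOpp, Prod.ext_iff, show (r:ℤ) - 1 ≠ r by omega,
      show r ≠ (r:ℤ) - 1 by omega, sub_add_cancel, show c ≠ (c:ℤ) - 1 by omega]
  have hf2 : aOpenOr grid r c (r - 1) c "N" (r, c) (r, (c:ℤ) + 1)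
      = (!pvRead grid r c "E" && !pvRead grid r (c + 1) "W") := by
    simp [aOpenOr, aIsOpen, pvOpp, Prod.ext_iff, show r ≠ (r:ℤ) - 1 by omega,
      show c ≠ (c:ℤ) + 1 by omega]
  have hf3 : aOpenOr grid r c (r - 1) c "N" ((r:ℤ) - 1, (c:ℤ) + 1) ((r:ℤ) - 1, c)
      = (!pvRead grid (r - 1) (c + 1) "W" && !pvRead grid (r - 1) c "E") := by
    simp [aOpenOr, aIsOpen, pvOpp, Prod.ext_iff, show (r:ℤ) - 1 ≠ r by omega,
      show c ≠ (c:ℤ) + 1 + 1 by omega, show ((c:ℤ) + 1) - 1 = c by omega]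
  have hf4 : aOpenOr grid r c (r - 1) c "N" ((r:ℤ) - 1, (c:ℤ) + 1) (r, (c:ℤ) + 1)
      = (!pvRead grid (r - 1) (c + 1) "S" && !pvRead grid r (c + 1) "N") := by
    simp [aOpenOr, aIsOpen, pvOpp, Prod.ext_iff, show (r:ℤ) - 1 ≠ r by omega,
      show r ≠ (r:ℤ) - 1 by omega, sub_add_cancel, show c ≠ (c:ℤ) + 1 by omega]
  by_cases hq1 : 1 ≤ c <;> by_cases hq2 : c + 1 < C
  · rw [hb1 hq1, hb2]
    simp [show ((1:ℤ) ≤ c) = True by simp; omega, show (c ≤ C) = True by simp; omega,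
      show ((0:ℤ) ≤ c + 1) = True by simp; omega, show (c + 1 < C) = True by simp; omega,
      show (c - 1 < C - 1) = True by simp; omega, show (c < C - 1) = True by simp; omega,
      show (r - 1 < R - 1) = True by simp; omega, show ((0:ℤ) ≤ c - 1) = True by simp; omega,
      show ((0:ℤ) ≤ r - 1) = True by simp; omega, show ((0:ℤ) ≤ r) = True by simp; omega,
      h0, h1, h2, h3, hrR, hq1, hq2, ha0, ha2, ha3, ha4, hf2, hf3, hf4,
      Bool.and_left_comm, Bool.and_comm, Bool.and_assoc]
  · rw [hb1 hq1]
    simp [show ((1:ℤ) ≤ c) = True by simp; omega, show (c ≤ C) = True by simp; omega,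
      show (c + 1 < C) = False by simp; omega,
      show (c - 1 < C - 1) = True by simp; omega, show (c < C - 1) = False by simp; omega,
      show (r - 1 < R - 1) = True by simp; omega, show ((0:ℤ) ≤ c - 1) = True by simp; omega,
      show ((0:ℤ) ≤ r - 1) = True by simp; omega, show ((0:ℤ) ≤ r) = True by simp; omega,
      h0, h1, h2, h3, hrR, hq1, ha0, ha2, ha3, ha4,
      Bool.and_left_comm, Bool.and_comm, Bool.and_assoc]
  · rw [hb2]
    simp [show ((1:ℤ) ≤ c) = False by simp; omega,
      show ((0:ℤ) ≤ c + 1) = True by simp; omega, show (c + 1 < C) = True by simp; omega,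
      show (c < C - 1) = True by simp; omega,
      show (r - 1 < R - 1) = True by simp; omega,
      show ((0:ℤ) ≤ r - 1) = True by simp; omega, show ((0:ℤ) ≤ r) = True by simp; omega,
      show ((0:ℤ) ≤ c - 1) = False by simp; omega,
      h0, h1, h2, h3, hrR, hq2, ha0, hf2, hf3, hf4,
      Bool.and_left_comm, Bool.and_comm, Bool.and_assoc]
  · simp [show ((1:ℤ) ≤ c) = False by simp; omega,
      show (c + 1 < C) = False by simp; omega, show (c < C - 1) = False by simp; omega]

-- ===== VERDICT (by name: the statement is the Claim_ definition above) =====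
theorem would_make_2x2_room_spec : Claim_equal_would_make_2x2_room := by
  intro grid r c d _ hpre
  unfold Spec_would_make_2x2_room
  rcases hpre.1 with rfl | rfl | rfl | rfl
  · exact eq_N grid r c
  · exact eq_S grid r c
  · exact eq_E grid r c
  · exact eq_W grid r c
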